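-- pv_equiv track=rewrite | github.com/BruE0/advent-of-code-2020 | code/day12_p2.py | new_waypoint
-- ===== SOURCE A (Python) =====
-- def new_waypoint(waypoint, command, number):
--     x, y = waypoint
--     if command in 'LR':
--         clockwise = command == 'L'
--         for _ in range((number%360)//90):
--             if clockwise:
--                 x, y = -y, x
--             else:
--                 x, y = y, -x
--     else:
--         if command == 'N':
--             y += number
--         elif command == 'S':
--             y -= number
--         elif command == 'E':
--             x += number
--         else:
--             x -= number
--     return x, y
-- ===== SOURCE B (Python) =====
-- def new_waypoint(waypoint, command, number):
--     x, y = waypoint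
--     if command == 'L' or command == 'R':
--         k = (number % 360) // 90
--         if command == 'R':
--             k = -k % 4
--         return ((x, y), (-y, x), (-x, -y), (y, -x))[k]
--     dx, dy = {'N': (0, 1), 'S': (0, -1), 'E': (1, 0)}.get(command, (-1, 0))
--     return (x + dx * number, y + dy * number)
-- ===== Notes on version B (the rewrite author's own statement) =====
-- stated objective: simpler
-- what changed: B replaces A's repeated quarter-turn loop with a closed-form rotation table indexed by (number%360)//90 (negated mod 4 for 'R') and A's if/elif translation chain with a direction-vector dictionary lookup.
-- outside the precondition, e.g. on new_waypoint((1, 2), '', 90): A returns (2, -1), B returns (-89, 2); on new_waypoint((1, 2), 'LR', 90): A returns (2, -1), B returns (-89, 2)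
import Mathlib
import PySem

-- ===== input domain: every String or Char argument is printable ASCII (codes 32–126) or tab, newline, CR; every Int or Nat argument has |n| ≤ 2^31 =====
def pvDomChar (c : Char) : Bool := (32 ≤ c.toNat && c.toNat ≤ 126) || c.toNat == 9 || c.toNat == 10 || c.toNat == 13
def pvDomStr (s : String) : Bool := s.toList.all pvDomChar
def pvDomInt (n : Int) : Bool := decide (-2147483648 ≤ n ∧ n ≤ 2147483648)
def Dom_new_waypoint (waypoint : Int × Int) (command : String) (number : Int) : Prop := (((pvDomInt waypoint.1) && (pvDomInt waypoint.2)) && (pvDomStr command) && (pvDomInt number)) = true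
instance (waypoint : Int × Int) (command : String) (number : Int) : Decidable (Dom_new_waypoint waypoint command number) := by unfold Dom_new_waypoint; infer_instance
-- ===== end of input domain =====

-- B replaces A's rotation loop with a closed-form quarter-turn table and A's
-- translation if-chain with a direction-vector lookup (objective: simpler).

-- ===== PORT A =====
def new_waypoint (waypoint : Int × Int) (command : String) (number : Int) : Int × Int :=
  let x := waypoint.1
  let y := waypoint.2
  if PySem.Str.isIn command "LR" then
    let clockwise := command = "L"
    (PySem.List.pyRange 0 (PySem.Int.floordiv (PySem.Int.mod number 360) 90) 1).foldl
      (fun (p : Int × Int) _ => if clockwise then (-p.2, p.1) else (p.2, -p.1)) (x, y)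
  else
    if command = "N" then (x, y + number)
    else if command = "S" then (x, y - number)
    else if command = "E" then (x + number, y)
    else (x - number, y)

-- ===== PORT B =====
def new_waypoint_alt (waypoint : Int × Int) (command : String) (number : Int) : Int × Int :=
  let x := waypoint.1
  let y := waypoint.2
  if command = "L" ∨ command = "R" then
    let k0 := PySem.Int.floordiv (PySem.Int.mod number 360) 90
    let k := if command = "R" then PySem.Int.mod (-k0) 4 else k0
    -- tuple indexing; k is always in 0..3, so the .getD default is unreachable
    (PySem.List.pyGet? [(x, y), (-y, x), (-x, -y), (y, -x)] k).getD (x, y)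
  else
    let d := (PySem.Dict.get? (PySem.Dict.mk [("N", ((0 : Int), (1 : Int))), ("S", (0, -1)), ("E", (1, 0))]) command).getD (-1, 0)
    (x + d.1 * number, y + d.2 * number)

-- ===== PRECONDITION & SPEC =====
-- Pre_ excludes command = "" and command = "LR": Python's substring test `command in 'LR'`
-- accidentally sends these through A's rotation branch, a corner no caller would specify,
-- while B naturally treats any non-'L'/'R' command as a translation.
def Pre_new_waypoint (waypoint : Int × Int) (command : String) (number : Int) : Prop :=
  command ≠ "" ∧ command ≠ "LR"
instance (waypoint : Int × Int) (command : String) (number : Int) : Decidable (Pre_new_waypoint waypoint command number) := by unfold Pre_new_waypoint; infer_instance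

def pvWitness_new_waypoint : (Int × Int) × String × Int := ((10, 4), "R", 90)

def Spec_new_waypoint (waypoint : Int × Int) (command : String) (number : Int) (out : Int × Int) : Prop := out = new_waypoint_alt waypoint command number
instance (waypoint : Int × Int) (command : String) (number : Int) (out : Int × Int) : Decidable (Spec_new_waypoint waypoint command number out) := by unfold Spec_new_waypoint; infer_instance

-- ===== CLAIM (what is proved, stated in full; the proofs are below) =====
def Claim_equal_new_waypoint : Prop := ∀ (waypoint : Int × Int) (command : String) (number : Int), Dom_new_waypoint waypoint command number → Pre_new_waypoint waypoint command number → Spec_new_waypoint waypoint command number (new_waypoint waypoint command number)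

-- ===== LEMMAS AND PROOFS =====

-- the quarter-turn count is in 0..3
lemma quarter_bounds (number : Int) :
    0 ≤ PySem.Int.floordiv (PySem.Int.mod number 360) 90 ∧
    PySem.Int.floordiv (PySem.Int.mod number 360) 90 < 4 := by
  have hm : PySem.Int.mod number 360 = number % 360 :=
    PySem.Int.mod_eq_emod_of_pos (by norm_num)
  have h0 : (0:Int) ≤ number % 360 := Int.emod_nonneg _ (by norm_num)
  have h1 : number % 360 < 360 := Int.emod_lt_of_pos _ (by norm_num)
  constructor
  · rw [(PySem.Int.le_floordiv_iff_mul_le (a := PySem.Int.mod number 360) (b := 90) (q := 0) (by norm_num))]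
    omega
  · rw [(PySem.Int.floordiv_lt_iff_lt_mul (a := PySem.Int.mod number 360) (b := 90) (q := 4) (by norm_num))]
    omega

-- the only infixes of ['L','R']
lemma infix_LR (l : List Char) (h : l <:+: ['L', 'R']) :
    l = [] ∨ l = ['L'] ∨ l = ['R'] ∨ l = ['L', 'R'] := by
  rcases h with ⟨s, t, hst⟩
  rcases s with _ | ⟨a, _ | ⟨b, s⟩⟩ <;>
    rcases l with _ | ⟨c, _ | ⟨d, _ | ⟨e, l⟩⟩⟩ <;>
      simp_all

theorem new_waypoint_spec : Claim_equal_new_waypoint := by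
  intro w c n hdom hpre
  obtain ⟨hne, hnLR⟩ := hpre
  unfold Spec_new_waypoint
  by_cases hL : c = "L"
  · subst hL
    obtain ⟨h0, h4⟩ := quarter_bounds n
    have hin : PySem.Str.isIn "L" "LR" = true := by decide
    have hk : PySem.Int.floordiv (PySem.Int.mod n 360) 90 = 0 ∨
        PySem.Int.floordiv (PySem.Int.mod n 360) 90 = 1 ∨
        PySem.Int.floordiv (PySem.Int.mod n 360) 90 = 2 ∨
        PySem.Int.floordiv (PySem.Int.mod n 360) 90 = 3 := by omega
    unfold new_waypoint new_waypoint_alt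
    rcases hk with hk | hk | hk | hk <;> simp only [hk] <;>
      norm_num [show PySem.Chars.isIn "L".toList "LR".toList = true from by decide,
        show (("L" : String) = "R") = False from by simp,
        show ((0 : Int)).toNat = 0 from rfl, show ((1 : Int)).toNat = 1 from rfl,
        show ((2 : Int)).toNat = 2 from rfl, show ((3 : Int)).toNat = 3 from rfl,
        PySem.List.pyGet?, PySem.List.pyIdx?,
        show PySem.List.pyRange 0 0 1 = [] from by decide,
        show PySem.List.pyRange 0 1 1 = [0] from by decide,
        show PySem.List.pyRange 0 2 1 = [0, 1] from by decide,
        show PySem.List.pyRange 0 3 1 = [0, 1, 2] from by decide]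
  · by_cases hR : c = "R"
    · subst hR
      obtain ⟨h0, h4⟩ := quarter_bounds n
      have hin : PySem.Str.isIn "R" "LR" = true := by decide
      have hk : PySem.Int.floordiv (PySem.Int.mod n 360) 90 = 0 ∨
          PySem.Int.floordiv (PySem.Int.mod n 360) 90 = 1 ∨
          PySem.Int.floordiv (PySem.Int.mod n 360) 90 = 2 ∨
          PySem.Int.floordiv (PySem.Int.mod n 360) 90 = 3 := by omega
      unfold new_waypoint new_waypoint_alt
      rcases hk with hk | hk | hk | hk <;> simp only [hk] <;>
        norm_num [show PySem.Chars.isIn "R".toList "LR".toList = true from by decide,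
          show (("R" : String) = "L") = False from by simp,
          show ((0 : Int)).toNat = 0 from rfl, show ((1 : Int)).toNat = 1 from rfl,
          show ((2 : Int)).toNat = 2 from rfl, show ((3 : Int)).toNat = 3 from rfl,
          PySem.List.pyGet?, PySem.List.pyIdx?,
          show PySem.Int.mod (-(1 : Int)) 4 = 3 from by decide,
          show PySem.Int.mod (-(2 : Int)) 4 = 2 from by decide,
          show PySem.Int.mod (-(3 : Int)) 4 = 1 from by decide,
          show PySem.Int.mod (-(0 : Int)) 4 = 0 from by decide,
          show PySem.Int.mod (0 : Int) 4 = 0 from by decide,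
          show PySem.List.pyRange 0 0 1 = [] from by decide,
          show PySem.List.pyRange 0 1 1 = [0] from by decide,
          show PySem.List.pyRange 0 2 1 = [0, 1] from by decide,
          show PySem.List.pyRange 0 3 1 = [0, 1, 2] from by decide]
    · -- translation side: A's substring test is false
      have hnotin : PySem.Str.isIn c "LR" = false := by
        by_contra h
        have h' : PySem.Str.isIn c "LR" = true := by
          cases hb : PySem.Str.isIn c "LR" <;> simp_all
        have hinf := (PySem.Str.isIn_iff_infix c "LR").mp h'
        have : c.toList = [] ∨ c.toList = ['L'] ∨ c.toList = ['R'] ∨ c.toList = ['L', 'R'] :=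
          infix_LR _ (by simpa using hinf)
        rcases this with h1 | h1 | h1 | h1
        · exact hne (String.toList_inj.mp (by simp_all))
        · exact hL (String.toList_inj.mp (by simp_all))
        · exact hR (String.toList_inj.mp (by simp_all))
        · exact hnLR (String.toList_inj.mp (by simp_all))
      unfold new_waypoint new_waypoint_alt
      simp only [hnotin, Bool.false_eq_true, if_false,
        show (c = "L" ∨ c = "R") = False from by simp [hL, hR]]
      by_cases hN : c = "N" <;> by_cases hS : c = "S" <;> by_cases hE : c = "E" <;>
        simp_all [PySem.Dict.get?_mk_cons, PySem.Dict.get?,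
          show ("N" = c) = (c = "N") from propext eq_comm,
          show ("S" = c) = (c = "S") from propext eq_comm,
          show ("E" = c) = (c = "E") from propext eq_comm,
          Prod.ext_iff] <;> ring
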